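-- pv_equiv track=rewrite | github.com/sohampatil14/cryptography-progimps | cryptanalysis.py | word_embed
-- ===== SOURCE A (Python) =====
-- def word_embed(word):
--     word = word.upper()
--     count = 0
--     letter_num = {}
--     embedding = []
--
--     for letter in word:
--         if letter not in letter_num:
--             letter_num[letter] = str(count)
--             count += 1
--         embedding.append(letter_num[letter])
--     return '.'.join(embedding)
-- ===== SOURCE B (Python) =====
-- def word_embed(word):
--     w = word.upper()
--     firsts = sorted(w.index(c) for c in set(w))
--     ids = {w[p]: str(r) for r, p in enumerate(firsts)}
--     return '.'.join(ids[c] for c in w)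
-- ===== Notes on version B (the rewrite author's own statement) =====
-- stated objective: alternative
-- what changed: Replaces A's single fused loop that threads a counter and fills the dict as it emits with a sort-based ranking: collect each distinct letter's first-occurrence position via w.index, sort those positions, rank them by enumerate to build the letter-to-id table, then map the word through the table.
import Mathlib
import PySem

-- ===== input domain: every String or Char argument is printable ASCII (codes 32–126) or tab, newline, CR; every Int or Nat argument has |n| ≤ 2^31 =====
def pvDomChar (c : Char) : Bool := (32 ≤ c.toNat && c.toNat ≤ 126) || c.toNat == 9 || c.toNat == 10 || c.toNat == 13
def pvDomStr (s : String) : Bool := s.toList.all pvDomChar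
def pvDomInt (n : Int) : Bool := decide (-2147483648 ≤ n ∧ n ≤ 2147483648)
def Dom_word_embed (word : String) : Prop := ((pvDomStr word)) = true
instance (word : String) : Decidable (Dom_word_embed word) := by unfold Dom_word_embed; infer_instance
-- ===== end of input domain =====

-- B replaces A's fused counter+dict loop with a sort-based ranking: it collects each distinct letter's first-occurrence position, sorts those positions, and ranks them to build the id table (objective: alternative).


-- ===== PORT A =====
-- fused loop over the uppercased word: count, dict letter→str(count), output list;
-- 'letter_num[letter]' never misses (the letter was just inserted or seen before), so getD "" covers the impossible none
def word_embed (word : String) : String :=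
  let w := (PySem.Str.upper word).toList
  let st := w.foldl
    (fun (st : Int × PySem.Dict Char String × List String) letter =>
      if st.2.1.contains letter then
        (st.1, st.2.1, st.2.2 ++ [(st.2.1.get? letter).getD ""])
      else
        let d := st.2.1.insert letter (PySem.Int.toStr st.1)
        (st.1 + 1, d, st.2.2 ++ [(d.get? letter).getD ""]))
    (0, PySem.Dict.empty, [])
  PySem.Str.join "." st.2.2

-- ===== PORT B =====
-- sort-based ranking: first-occurrence positions of the distinct letters, sorted, then ranked by enumerate;
-- set(w) iteration order is irrelevant (the positions are sorted); 'w.index(c)' (c ∈ w) and 'ids[c]' never miss,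
-- and 'w[p]' is always in range, so the getD defaults are unreachable
def word_embed_alt (word : String) : String :=
  let w := (PySem.Str.upper word).toList
  let firsts := PySem.List.sorted
    ((PySem.Set.ofList w).map (fun c => (((PySem.List.index? w c).getD 0 : Nat) : Int)))
    (fun x => x) false
  let ids := (PySem.List.enumerate firsts).foldl
    (fun (d : PySem.Dict Char String) rp =>
      d.insert ((PySem.List.pyGet? w rp.2).getD 'A') (PySem.Int.toStr rp.1))
    PySem.Dict.empty
  PySem.Str.join "." (w.map (fun c => (ids.get? c).getD ""))

-- ===== PRECONDITION & SPEC =====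
def Spec_word_embed (word : String) (out : String) : Prop := out = word_embed_alt word
instance (word : String) (out : String) : Decidable (Spec_word_embed word out) := by unfold Spec_word_embed; infer_instance

-- ===== CLAIM (what is proved, stated in full; the proofs are below) =====
def Claim_equal_word_embed : Prop := ∀ (word : String), Dom_word_embed word → Spec_word_embed word (word_embed word)

-- ===== LEMMAS AND PROOFS =====

-- the id A assigns to c: str of c's position in the first-occurrence dedup of w
def pvEmb (l : List Char) (c : Char) : String :=
  PySem.Int.toStr (((PySem.List.index? l c).getD 0 : Nat) : Int)

-- c's first-occurrence position in w, as an Int (the value B sorts)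
def pvGIdx (w : List Char) (c : Char) : Int := (((PySem.List.index? w c).getD 0 : Nat) : Int)

def pvStep (st : Int × PySem.Dict Char String × List String) (letter : Char) :
    Int × PySem.Dict Char String × List String :=
  if st.2.1.contains letter then
    (st.1, st.2.1, st.2.2 ++ [(st.2.1.get? letter).getD ""])
  else
    let d := st.2.1.insert letter (PySem.Int.toStr st.1)
    (st.1 + 1, d, st.2.2 ++ [(d.get? letter).getD ""])

-- A's loop invariant: counter = #distinct so far, dict maps c to str(position in dedup), output = map
lemma pvInv (w : List Char) :
    (w.foldl pvStep (0, PySem.Dict.empty, [])).1 = ((PySem.List.dedup w).length : Int) ∧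
    (∀ c, (w.foldl pvStep (0, PySem.Dict.empty, [])).2.1.get? c =
      if c ∈ PySem.List.dedup w then some (pvEmb (PySem.List.dedup w) c) else none) ∧
    (w.foldl pvStep (0, PySem.Dict.empty, [])).2.2 = w.map (pvEmb (PySem.List.dedup w)) := by
  induction w using List.reverseRecOn with
  | nil => simp [PySem.List.dedup, PySem.Dict.get?_empty]
  | append_singleton w a ih =>
    obtain ⟨h1, h2, h3⟩ := ih
    rw [List.foldl_append]
    simp only [List.foldl_cons, List.foldl_nil]
    by_cases ha : a ∈ w
    · have hd : PySem.List.dedup (w ++ [a]) = PySem.List.dedup w := by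
        simp [PySem.Set.ofList_append_singleton,
          PySem.Set.add_of_mem ((PySem.Set.mem_ofList w a).mpr ha)]
      have hmem : a ∈ PySem.List.dedup w := (PySem.List.mem_dedup w a).mpr ha
      have hc : (w.foldl pvStep (0, PySem.Dict.empty, [])).2.1.contains a = true := by
        rw [PySem.Dict.contains_eq_isSome_get?, h2 a, if_pos hmem]; rfl
      simp only [pvStep, hc, if_pos, hd]
      refine ⟨h1, h2, ?_⟩
      rw [h2 a, if_pos hmem]
      simp [h3]
    · have hnm : a ∉ PySem.List.dedup w := fun h => ha ((PySem.List.mem_dedup w a).mp h)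
      have hd : PySem.List.dedup (w ++ [a]) = PySem.List.dedup w ++ [a] := by
        simp only [PySem.List.dedup_eq_ofList, PySem.Set.ofList_append_singleton]
        exact PySem.Set.add_of_not_mem (by simpa [PySem.Set.mem_ofList] using ha)
      have hc : (w.foldl pvStep (0, PySem.Dict.empty, [])).2.1.contains a = false := by
        rw [PySem.Dict.contains_eq_isSome_get?, h2 a, if_neg hnm]; rfl
      have hidx : PySem.List.index? (PySem.List.dedup w ++ [a]) a
          = some (PySem.List.dedup w).length := PySem.List.index?_append_singleton_self _ a hnm
      have hembA : pvEmb (PySem.List.dedup (w ++ [a])) a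
          = PySem.Int.toStr ((PySem.List.dedup w).length : Int) := by
        rw [pvEmb, hd, hidx]; rfl
      have hembOld : ∀ c ∈ PySem.List.dedup w,
          pvEmb (PySem.List.dedup (w ++ [a])) c = pvEmb (PySem.List.dedup w) c := by
        intro c hcm
        rw [pvEmb, pvEmb, hd, PySem.List.index?_append_of_mem _ hcm]
      simp only [pvStep, hc, Bool.false_eq_true, if_false]
      refine ⟨?_, ?_, ?_⟩
      · simp only [PySem.List.dedup_eq_ofList] at hd ⊢
        rw [h1, hd, List.length_append]
        simp only [PySem.List.dedup_eq_ofList]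
        push_cast; simp
      · intro c
        rw [PySem.Dict.get?_insert]
        by_cases hca : c = a
        · subst hca
          rw [if_pos rfl, if_pos (by rw [hd]; exact List.mem_append_right _ (List.mem_singleton.mpr rfl)), hembA, h1]
        · rw [if_neg hca, h2 c]
          by_cases hcd : c ∈ PySem.List.dedup w
          · rw [if_pos hcd, if_pos (by rw [hd]; exact List.mem_append_left _ hcd), hembOld c hcd]
          · rw [if_neg hcd, if_neg (by rw [hd]; simp only [List.mem_append, List.mem_singleton]; rintro (h | h); exacts [hcd h, hca h])]
      · rw [PySem.Dict.get?_insert_self, h1, h3]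
        simp only [List.map_append, List.map_cons, List.map_nil, Option.getD_some]
        rw [← hembA]
        congr 1
        apply List.map_congr_left
        intro c hcw
        exact (hembOld c ((PySem.List.mem_dedup w c).mpr hcw)).symm

-- every c ∈ w has a first-occurrence position: index? is some k, k < len w, w[k] = c
lemma pvIdxSpec (w : List Char) (c : Char) (hc : c ∈ w) :
    ∃ k, PySem.List.index? w c = some k ∧ ∃ hk : k < w.length, w[k] = c := by
  obtain ⟨k, hk⟩ := Option.isSome_iff_exists.mp ((PySem.List.index?_isSome_iff w c).mpr hc)
  obtain ⟨hlt, hget, -⟩ := PySem.List.getElem_of_index?_eq_some hk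
  exact ⟨k, hk, hlt, hget⟩

-- the first-occurrence positions along dedup w are strictly increasing and < len w
lemma pvMono (w : List Char) :
    ((PySem.List.dedup w).map (pvGIdx w)).Pairwise (· < ·) ∧
    (∀ x ∈ (PySem.List.dedup w).map (pvGIdx w), x < (w.length : Int)) := by
  induction w using List.reverseRecOn with
  | nil => simp [PySem.List.dedup]
  | append_singleton w a ih =>
    obtain ⟨hp, hb⟩ := ih
    have hold : ∀ c ∈ PySem.List.dedup w, pvGIdx (w ++ [a]) c = pvGIdx w c := by
      intro c hcm
      rw [pvGIdx, pvGIdx,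
        PySem.List.index?_append_of_mem [a] ((PySem.List.mem_dedup w c).mp hcm)]
    by_cases ha : a ∈ w
    · have hd : PySem.List.dedup (w ++ [a]) = PySem.List.dedup w := by
        simp [PySem.Set.ofList_append_singleton,
          PySem.Set.add_of_mem ((PySem.Set.mem_ofList w a).mpr ha)]
      rw [hd, List.map_congr_left hold]
      refine ⟨hp, fun x hx => lt_of_lt_of_le (hb x hx) ?_⟩
      simp only [List.length_append, List.length_cons, List.length_nil]
      push_cast; omega
    · have hnm : a ∉ PySem.List.dedup w := fun h => ha ((PySem.List.mem_dedup w a).mp h)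
      have hd : PySem.List.dedup (w ++ [a]) = PySem.List.dedup w ++ [a] := by
        simp only [PySem.List.dedup_eq_ofList, PySem.Set.ofList_append_singleton]
        exact PySem.Set.add_of_not_mem (by simpa [PySem.Set.mem_ofList] using ha)
      have hga : pvGIdx (w ++ [a]) a = (w.length : Int) := by
        rw [pvGIdx, PySem.List.index?_append_singleton_self w a ha]; rfl
      rw [hd, List.map_append, List.map_singleton, List.map_congr_left hold, hga]
      constructor
      · rw [List.pairwise_append]
        exact ⟨hp, List.pairwise_singleton _ _,
          fun x hx y hy => by rw [List.mem_singleton] at hy; subst hy; exact hb x hx⟩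
      · intro x hx
        rw [List.mem_append, List.mem_singleton] at hx
        have : (w.length : Int) < ((w ++ [a]).length : Int) := by
          simp [List.length_append]
        rcases hx with hx | hx
        · exact lt_trans (hb x hx) this
        · subst hx; exact this

-- B's sorted(firsts) IS the first-occurrence positions along dedup w, already in order
lemma pvSortedFirsts (w : List Char) :
    PySem.List.sorted ((PySem.Set.ofList w).map (pvGIdx w)) (fun x : Int => x) false
      = (PySem.List.dedup w).map (pvGIdx w) := by
  exact PySem.List.sorted_eq_of_perm_of_pairwise_lt _ _ (fun x : Int => x)
    (List.Perm.refl _) ((pvMono w).1)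

-- w[first-occurrence position of c] recovers c
lemma pvRecover (w : List Char) (c : Char) (hc : c ∈ w) :
    (PySem.List.pyGet? w (pvGIdx w c)).getD 'A' = c := by
  obtain ⟨k, hk, hlt, hget⟩ := pvIdxSpec w c hc
  rw [pvGIdx, hk, Option.getD_some, PySem.List.pyGet?_natCast, List.getElem?_eq_getElem hlt,
    Option.getD_some, hget]

-- the dict B builds from the ranked positions maps each c ∈ dedup w to its dedup-position id
lemma pvDictLem (w : List Char) (d : List Char) (hnd : d.Nodup) (hdw : ∀ c ∈ d, c ∈ w) :
    ∀ c, ((PySem.List.enumerate (d.map (pvGIdx w))).foldl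
      (fun (dd : PySem.Dict Char String) rp =>
        dd.insert ((PySem.List.pyGet? w rp.2).getD 'A') (PySem.Int.toStr rp.1))
      PySem.Dict.empty).get? c
      = if c ∈ d then some (pvEmb d c) else none := by
  induction d using List.reverseRecOn with
  | nil => intro c; simp [PySem.Dict.get?_empty]
  | append_singleton d a ih =>
    intro c
    have hnd' : d.Nodup := (List.nodup_append.mp hnd).1
    have hna : a ∉ d := fun h =>
      List.disjoint_of_nodup_append hnd h (List.mem_singleton.mpr rfl)
    have hdw' : ∀ c ∈ d, c ∈ w := fun c hc => hdw c (List.mem_append_left _ hc)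
    have haw : a ∈ w := hdw a (List.mem_append_right _ (List.mem_singleton.mpr rfl))
    rw [List.map_append, List.map_singleton, PySem.List.enumerate_append,
      List.foldl_append]
    simp only [PySem.List.enumerate_cons, PySem.List.enumerate_nil, List.foldl_cons,
      List.foldl_nil, List.length_map, pvRecover w a haw]
    rw [PySem.Dict.get?_insert]
    by_cases hca : c = a
    · subst hca
      rw [if_pos rfl, if_pos (List.mem_append_right _ (List.mem_singleton.mpr rfl))]
      rw [pvEmb, PySem.List.index?_append_singleton_self d c hna, Option.getD_some]
      norm_num
    · rw [if_neg hca, ih hnd' hdw' c]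
      by_cases hcd : c ∈ d
      · rw [if_pos hcd, if_pos (List.mem_append_left _ hcd), pvEmb, pvEmb,
          PySem.List.index?_append_of_mem _ hcd]
      · rw [if_neg hcd, if_neg (by
          simp only [List.mem_append, List.mem_singleton]
          rintro (h | h); exacts [hcd h, hca h])]

-- B's id dictionary, as the port builds it (named so the main lemma can state the goal)
def pvIds (w : List Char) : PySem.Dict Char String :=
  (PySem.List.enumerate (PySem.List.sorted
      ((PySem.Set.ofList w).map (fun c => (((PySem.List.index? w c).getD 0 : Nat) : Int)))
      (fun x => x) false)).foldl
    (fun (d : PySem.Dict Char String) rp =>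
      d.insert ((PySem.List.pyGet? w rp.2).getD 'A') (PySem.Int.toStr rp.1))
    PySem.Dict.empty

lemma pvMain (w : List Char) :
    PySem.Str.join "." ((w.foldl pvStep ((0 : Int), PySem.Dict.empty, ([] : List String))).2.2)
      = PySem.Str.join "." (w.map (fun c => ((pvIds w).get? c).getD "")) := by
  rw [(pvInv w).2.2]
  unfold pvIds
  rw [show (fun c => (((PySem.List.index? w c).getD 0 : Nat) : Int)) = pvGIdx w from rfl,
    pvSortedFirsts w]
  congr 1
  apply List.map_congr_left
  intro c hcw
  have hdict := pvDictLem w (PySem.List.dedup w)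
    (by simp [PySem.List.dedup_eq_ofList, PySem.Set.nodup_ofList])
    (fun c hc => (PySem.List.mem_dedup w c).mp hc) c
  rw [hdict, if_pos ((PySem.List.mem_dedup w c).mpr hcw), Option.getD_some]

-- ===== VERDICT (by name: the statement is the Claim_ definition above) =====
theorem word_embed_spec : Claim_equal_word_embed := by
  intro word _
  unfold Spec_word_embed word_embed word_embed_alt
  exact pvMain (PySem.Str.upper word).toList
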